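-- pv_equiv track=rewrite | github.com/PentHertz/urh-ng | src/urh/awre/ProtocolMatcher.py | _find_sync_after_preamble
-- ===== SOURCE A (Python) =====
-- from typing import List, Tuple, Optional
--
-- def _find_sync_after_preamble(bit_strings: List[str], preamble: str) -> str:
--     """Find common sync word after the preamble."""
--     if not preamble or not bit_strings:
--         return ""
--
--     preamble_len = len(preamble)
--     post_preamble = [
--         bs[preamble_len : preamble_len + 32]
--         for bs in bit_strings
--         if len(bs) > preamble_len + 8
--     ]
--     if not post_preamble:
--         return ""
--
--     sync_word = _find_common_prefix(post_preamble)
--     # Sync word should be non-trivial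
--     if len(sync_word) < 4:
--         return ""
--     if sync_word == "0" * len(sync_word) or sync_word == "1" * len(sync_word):
--         return ""
--     return sync_word
--
-- def _find_common_prefix(strings: List[str]) -> str:
--     """Find the longest common prefix of a list of strings."""
--     if not strings:
--         return ""
--     prefix = strings[0]
--     for s in strings[1:]:
--         while not s.startswith(prefix):
--             prefix = prefix[:-1]
--             if not prefix:
--                 return ""
--     return prefix
-- ===== SOURCE B (Python) =====
-- from typing import List
--
-- def _lcp(a: str, b: str) -> str:
--     """Longest common prefix of two strings by column-wise compare with early exit."""
--     i = 0
--     n = min(len(a), len(b))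
--     while i < n and a[i] == b[i]:
--         i += 1
--     return a[:i]
--
-- def _find_sync_after_preamble(bit_strings: List[str], preamble: str) -> str:
--     """Find common sync word after the preamble (single pass, pairwise LCP fold)."""
--     if not preamble or not bit_strings:
--         return ""
--     plen = len(preamble)
--     prefix = None
--     for bs in bit_strings:
--         if len(bs) <= plen + 8:
--             continue
--         seg = bs[plen : plen + 32]
--         prefix = seg if prefix is None else _lcp(prefix, seg)
--     if prefix is None or len(prefix) < 4:
--         return ""
--     if all(c == "0" for c in prefix) or all(c == "1" for c in prefix):
--         return ""
--     return prefix
-- ===== Notes on version B (the rewrite author's own statement) =====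
-- stated objective: simpler
-- what changed: Replaced A's two-phase approach (build the post-preamble list, then repeatedly shrink a whole-string candidate via startswith/chop-last-char) with a single pass over bit_strings that folds a pairwise character-by-character longest-common-prefix with early exit at the first differing column; no intermediate list, and the trivial-word test uses all() instead of comparing against '0'*len/'1'*len.
import Mathlib
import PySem

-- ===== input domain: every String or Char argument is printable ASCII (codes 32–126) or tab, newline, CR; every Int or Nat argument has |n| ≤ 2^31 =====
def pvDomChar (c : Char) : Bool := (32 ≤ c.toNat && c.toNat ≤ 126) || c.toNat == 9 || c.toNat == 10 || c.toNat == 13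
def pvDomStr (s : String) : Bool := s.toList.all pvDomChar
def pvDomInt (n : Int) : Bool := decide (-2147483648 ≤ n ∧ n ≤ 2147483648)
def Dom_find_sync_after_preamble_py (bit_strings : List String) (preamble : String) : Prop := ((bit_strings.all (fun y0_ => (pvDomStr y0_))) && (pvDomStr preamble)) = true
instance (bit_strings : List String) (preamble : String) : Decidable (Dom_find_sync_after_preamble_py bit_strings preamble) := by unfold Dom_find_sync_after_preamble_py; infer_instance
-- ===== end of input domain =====

-- B replaces A's shrink-the-whole-candidate `_find_common_prefix` (repeated startswith +
-- chop-last-char) by a single pass over bit_strings folding a pairwise character-wise LCP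
-- with early exit; objective: simpler (no intermediate list, no quadratic shrinking).

-- ===== PORT A =====
-- the inner `while not s.startswith(prefix): prefix = prefix[:-1]; if not prefix: return ""`
def pvShrink (s : List Char) (p : List Char) : List Char :=
  if PySem.Chars.startswith s p then p
  else if p.dropLast = [] then [] else pvShrink s p.dropLast
termination_by p.length
decreasing_by
  rename_i h1 h2
  cases p with
  | nil => simp [PySem.Chars.startswith] at h1
  | cons a as => simp [List.length_dropLast]

-- `_find_common_prefix`: Python's early `return ""` once the prefix empties is result-identical
-- to continuing the fold, since pvShrink fixes the empty prefix ("".startswith always holds).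
def find_common_prefix_py (strings : List String) : String :=
  match strings with
  | [] => ""
  | s0 :: rest => String.ofList (rest.foldl (fun p s => pvShrink s.toList p) s0.toList)

def find_sync_after_preamble_py (bit_strings : List String) (preamble : String) : String :=
  if preamble = "" || bit_strings = [] then ""
  else
    let preamble_len : Int := (preamble.toList.length : Int)
    let post_preamble :=
      (bit_strings.filter (fun bs => decide (preamble_len + 8 < (bs.toList.length : Int)))).map
        (fun bs => String.ofList (PySem.Chars.slice bs.toList (some preamble_len) (some (preamble_len + 32))))
    if post_preamble = [] then ""
    else
      let sync_word := find_common_prefix_py post_preamble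
      if sync_word.toList.length < 4 then ""
      -- sync_word == "0" * len(sync_word) / "1" * len(sync_word)
      else if sync_word.toList = List.replicate sync_word.toList.length '0' ∨
              sync_word.toList = List.replicate sync_word.toList.length '1' then ""
      else sync_word

-- ===== PORT B =====
-- `_lcp`: character-by-character compare with early exit at the first differing column
def lcpChars : List Char → List Char → List Char
  | a :: as, b :: bs => if a = b then a :: lcpChars as bs else []
  | _, _ => []

def find_sync_after_preamble_py_alt (bit_strings : List String) (preamble : String) : String :=
  if preamble = "" || bit_strings = [] then ""
  else
    let plen := preamble.toList.length
    let pref :=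
      bit_strings.foldl (fun (acc : Option (List Char)) bs =>
        if bs.toList.length ≤ plen + 8 then acc
        else
          let seg := (bs.toList.drop plen).take 32
          match acc with
          | none => some seg
          | some p => some (lcpChars p seg)) none
    match pref with
    | none => ""
    | some p =>
      if p.length < 4 then ""
      else if p.all (· == '0') || p.all (· == '1') then ""
      else String.ofList p

-- ===== PRECONDITION & SPEC =====
def Spec_find_sync_after_preamble_py (bit_strings : List String) (preamble : String) (out : String) : Prop := out = find_sync_after_preamble_py_alt bit_strings preamble
instance (bit_strings : List String) (preamble : String) (out : String) : Decidable (Spec_find_sync_after_preamble_py bit_strings preamble out) := by unfold Spec_find_sync_after_preamble_py; infer_instance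

-- ===== CLAIM (what is proved, stated in full; the proofs are below) =====
def Claim_equal_find_sync_after_preamble_py : Prop := ∀ (bit_strings : List String) (preamble : String), Dom_find_sync_after_preamble_py bit_strings preamble → Spec_find_sync_after_preamble_py bit_strings preamble (find_sync_after_preamble_py bit_strings preamble)

-- ===== LEMMAS AND PROOFS =====

theorem lcp_of_prefix (p s : List Char) (h : p <+: s) : lcpChars p s = p := by
  induction p generalizing s with
  | nil => simp [lcpChars]
  | cons a as ih =>
    cases s with
    | nil => simp at h
    | cons b bs =>
      obtain ⟨t, ht⟩ := h
      simp at ht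
      obtain ⟨hab, htail⟩ := ht
      simp [lcpChars, hab, ih bs ⟨t, htail⟩]

theorem lcp_dropLast (p s : List Char) (h : ¬ p <+: s) : lcpChars p s = lcpChars p.dropLast s := by
  induction p generalizing s with
  | nil => simp at h
  | cons a as ih =>
    cases s with
    | nil =>
      cases as with
      | nil => simp [lcpChars]
      | cons c cs => simp [lcpChars]
    | cons b bs =>
      by_cases hab : a = b
      · subst hab
        have has : ¬ as <+: bs := fun hp => h (by simpa using hp)
        cases as with
        | nil => simp at has
        | cons c cs =>
          simp [List.dropLast_cons₂, lcpChars, ih bs has]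
      · cases as with
        | nil => simp [lcpChars, hab]
        | cons c cs => simp [lcpChars, hab, List.dropLast_cons₂]

theorem shrink_eq_lcp (s p : List Char) : pvShrink s p = lcpChars p s := by
  fun_induction pvShrink s p with
  | case1 p h =>
    rw [PySem.Chars.startswith_iff] at h
    exact (lcp_of_prefix p s h).symm
  | case2 p h h2 =>
    rw [PySem.Chars.startswith_iff] at h
    rw [lcp_dropLast p s h, h2]
    simp [lcpChars]
  | case3 p h h2 ih =>
    rw [PySem.Chars.startswith_iff] at h
    rw [lcp_dropLast p s h]
    exact ih

-- B's fold step and A's post-preamble segment list, abstracted over plen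
def pvStep (plen : Nat) (acc : Option (List Char)) (bs : String) : Option (List Char) :=
  if bs.toList.length ≤ plen + 8 then acc
  else
    let seg := (bs.toList.drop plen).take 32
    match acc with
    | none => some seg
    | some p => some (lcpChars p seg)

def pvSegs (plen : Nat) (l : List String) : List (List Char) :=
  (l.filter (fun bs => !decide (bs.toList.length ≤ plen + 8))).map
    (fun bs => (bs.toList.drop plen).take 32)

theorem foldl_step_some (plen : Nat) (l : List String) (p : List Char) :
    l.foldl (pvStep plen) (some p) = some ((pvSegs plen l).foldl (fun q s => lcpChars q s) p) := by
  induction l generalizing p with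
  | nil => simp [pvSegs]
  | cons bs rest ih =>
    by_cases h : bs.toList.length ≤ plen + 8
    · simp only [List.foldl_cons, pvStep, if_pos h]
      rw [ih]
      unfold pvSegs
      have h' : bs.length ≤ plen + 8 := by simpa using h
      simp [h']
    · simp only [List.foldl_cons, pvStep, if_neg h]
      rw [ih]
      unfold pvSegs
      have h' : ¬ bs.length ≤ plen + 8 := by simpa using h
      simp [h']

theorem foldl_step_none (plen : Nat) (l : List String) :
    l.foldl (pvStep plen) none =
      match pvSegs plen l with
      | [] => none
      | s :: rest => some (rest.foldl (fun q t => lcpChars q t) s) := by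
  induction l with
  | nil => simp [pvSegs]
  | cons bs rest ih =>
    by_cases h : bs.toList.length ≤ plen + 8
    · simp only [List.foldl_cons, pvStep, if_pos h]
      rw [ih]
      unfold pvSegs
      have h' : bs.length ≤ plen + 8 := by simpa using h
      simp [h']
    · simp only [List.foldl_cons, pvStep, if_neg h]
      rw [foldl_step_some]
      unfold pvSegs
      have h' : ¬ bs.length ≤ plen + 8 := by simpa using h
      simp [h']

theorem all_eq_replicate (p : List Char) (c : Char) :
    (p.all (· == c) = true) ↔ p = List.replicate p.length c := by
  rw [List.eq_replicate_length]
  simp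

-- ===== VERDICT (by name: the statement is the Claim_ definition above) =====
theorem find_sync_after_preamble_py_spec : Claim_equal_find_sync_after_preamble_py := by
  intro bit_strings preamble _
  unfold Spec_find_sync_after_preamble_py find_sync_after_preamble_py find_sync_after_preamble_py_alt
  by_cases hguard : preamble = "" || bit_strings = []
  · simp [hguard]
  · simp only [hguard, Bool.false_eq_true, if_false]
    set plen := preamble.toList.length with hplen
    -- identify A's filter condition and slice with B's
    have hfilt : ∀ bs : String,
        (decide ((plen : Int) + 8 < (bs.toList.length : Int))) = !decide (bs.toList.length ≤ plen + 8) := by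
      intro bs
      have hlen : bs.toList.length = bs.length := by simp
      by_cases h : bs.length ≤ plen + 8
      · have h2 : ¬ ((plen : Int) + 8 < (bs.length : Int)) := by omega
        simp [hlen, h, h2]
      · have h2 : ((plen : Int) + 8 < (bs.length : Int)) := by omega
        simp [hlen, h, h2]
    have hslice : ∀ bs : String,
        PySem.List.slice bs.toList (some (plen : Int)) (some ((plen : Int) + 32)) =
          (bs.toList.drop plen).take 32 := by
      intro bs
      have : ((plen : Int) + 32) = ((plen : Int) + ((32 : Nat) : Int)) := by push_cast; ring
      rw [this, PySem.List.slice_natCast_add]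
    -- B's fold is the pvStep fold
    have hfold : bit_strings.foldl (fun (acc : Option (List Char)) bs =>
        if bs.toList.length ≤ plen + 8 then acc
        else
          let seg := (bs.toList.drop plen).take 32
          match acc with
          | none => some seg
          | some p => some (lcpChars p seg)) none = bit_strings.foldl (pvStep plen) none := by
      have : (fun (acc : Option (List Char)) bs =>
          if bs.toList.length ≤ plen + 8 then acc
          else
            let seg := (bs.toList.drop plen).take 32
            match acc with
            | none => some seg
            | some p => some (lcpChars p seg)) = pvStep plen := by
        funext acc bs; rfl
      rw [this]
    rw [hfold, foldl_step_none]
    -- A's post_preamble list is pvSegs mapped through String.ofList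
    have hpost : (bit_strings.filter (fun bs => decide ((plen : Int) + 8 < (bs.toList.length : Int)))).map
        (fun bs => String.ofList (PySem.Chars.slice bs.toList (some (plen : Int)) (some ((plen : Int) + 32)))) =
        (pvSegs plen bit_strings).map String.ofList := by
      unfold pvSegs
      rw [List.map_map, List.filter_congr (fun bs _ => hfilt bs)]
      apply List.map_congr_left
      intro bs _
      simp [hslice bs]
    rw [hpost]
    cases hsegs : pvSegs plen bit_strings with
    | nil => simp
    | cons s0 rest =>
      rw [List.map_cons, if_neg (by simp)]
      unfold find_common_prefix_py
      have hfoldA : (rest.map String.ofList).foldl (fun p s => pvShrink s.toList p) (String.ofList s0).toList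
          = rest.foldl (fun q t => lcpChars q t) s0 := by
        rw [List.foldl_map]
        simp only [shrink_eq_lcp, String.toList_ofList]
      simp only [hfoldA]
      set p := rest.foldl (fun q t => lcpChars q t) s0 with hp
      by_cases hlen : p.length < 4
      · simp [hlen]
      · simp only [String.toList_ofList, hlen, if_false]
        have h0 := all_eq_replicate p '0'
        have h1 := all_eq_replicate p '1'
        by_cases htriv : p = List.replicate p.length '0' ∨ p = List.replicate p.length '1'
        · have : (p.all (· == '0') || p.all (· == '1')) = true := by
            rcases htriv with h | h
            · simp [h0.mpr h]
            · simp [h1.mpr h]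
          simp [htriv, this]
        · rw [not_or] at htriv
          have : (p.all (· == '0') || p.all (· == '1')) = false := by
            rw [Bool.or_eq_false_iff]
            constructor
            · by_contra hc; simp only [Bool.not_eq_false] at hc; exact htriv.1 (h0.mp hc)
            · by_contra hc; simp only [Bool.not_eq_false] at hc; exact htriv.2 (h1.mp hc)
          simp only [this, Bool.false_eq_true, if_false]
          simp [htriv.1, htriv.2]
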